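-- pv_equiv track=rewrite | github.com/ayazkhan27/cyclic | dynamiccyclicprime.py | get_repeating_sequence
-- ===== SOURCE A (Python) =====
-- def get_repeating_sequence(n):
--     sequence = ""
--     remainder = 1
--     remainders = {}
--     pos = 0
--
--     while remainder != 0 and remainder not in remainders:
--         remainders[remainder] = pos
--         remainder *= 10
--         digit = remainder // n
--         sequence += str(digit)
--         remainder %= n
--         pos += 1
--
--     if remainder in remainders:
--         start = remainders[remainder]
--         sequence = sequence[start:]
--
--     return sequence
-- ===== SOURCE B (Python) =====
-- def get_repeating_sequence(n):
--     # Floyd cycle detection on r -> r*10 % n (O(1) extra space, no dict/hashing):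
--     # find the cycle's start (mu) and length (lam), then emit the digits and cut.
--     def f(r):
--         return (r * 10) % n
--     # phase 1: tortoise/hare race to a meeting point inside the cycle
--     slow, fast = f(1), f(f(1))
--     while slow != fast:
--         slow = f(slow)
--         fast = f(f(fast))
--     # phase 2: find mu, the index where the cycle starts
--     mu, slow = 0, 1
--     while slow != fast:
--         slow = f(slow)
--         fast = f(fast)
--         mu += 1
--     # phase 3: find lam, the cycle length
--     lam, fast = 1, f(slow)
--     while slow != fast:
--         fast = f(fast)
--         lam += 1
--     # phase 4: emit the digits
--     out = []
--     r = 1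
--     if slow == 0:
--         # the expansion terminates: all mu digits are the answer
--         for _ in range(mu):
--             out.append(str(r * 10 // n))
--             r = f(r)
--         return "".join(out)
--     else:
--         for _ in range(mu + lam):
--             out.append(str(r * 10 // n))
--             r = f(r)
--         return "".join(out)[mu:]
-- ===== Notes on version B (the rewrite author's own statement) =====
-- stated objective: alternative
-- what changed: A detects the repetend by recording every remainder in a position dict while growing the digit string by repeated concatenation; B uses Floyd tortoise/hare cycle detection on r -> r*10 % n (no dict, O(1) extra state during detection) to find the cycle start mu and length lam, then emits the digits into a list and joins once, cutting at mu.
import Mathlib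
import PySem

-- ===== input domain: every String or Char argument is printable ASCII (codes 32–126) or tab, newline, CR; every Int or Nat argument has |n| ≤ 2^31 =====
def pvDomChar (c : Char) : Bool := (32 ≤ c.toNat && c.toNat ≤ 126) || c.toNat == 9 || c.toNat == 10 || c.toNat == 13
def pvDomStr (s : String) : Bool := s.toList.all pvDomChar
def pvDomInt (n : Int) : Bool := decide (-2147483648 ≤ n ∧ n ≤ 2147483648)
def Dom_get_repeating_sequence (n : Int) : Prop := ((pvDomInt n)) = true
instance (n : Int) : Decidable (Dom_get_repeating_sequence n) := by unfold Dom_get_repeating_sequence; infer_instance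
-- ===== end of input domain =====

-- B replaces A's dict-of-seen-remainders with Floyd tortoise/hare cycle detection (no
-- hashing, O(1) extra state), then emits the digits and cuts at the cycle start
-- (objective: alternative algorithm; no speed claim).


-- ===== PORT A =====
-- A's while loop; fuel (n.natAbs + 2) only makes the recursion total — it exceeds the
-- number of distinct remainders, so the Boolean condition always exits first.
def pvALoop (n : Int) : Nat → List Char → Int → PySem.Dict Int Int → Int →
    (List Char × Int × PySem.Dict Int Int)
  | 0, seq, r, seen, _ => (seq, r, seen)
  | fuel + 1, seq, r, seen, pos =>
    if r != 0 && !(PySem.Dict.contains seen r) then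
      let seen' := PySem.Dict.insert seen r pos
      let r10 := r * 10
      let digit := PySem.Int.floordiv r10 n
      let seq' := seq ++ PySem.Int.toChars digit
      let r' := PySem.Int.mod r10 n
      pvALoop n fuel seq' r' seen' (pos + 1)
    else (seq, r, seen)

def get_repeating_sequence (n : Int) : String :=
  let (seq, r, seen) := pvALoop n (n.natAbs + 2) [] 1 PySem.Dict.empty 0
  if PySem.Dict.contains seen r then
    String.ofList (PySem.Chars.slice seq (some (PySem.Dict.getD seen r 0)) none)
  else String.ofList seq

-- ===== PORT B =====
-- B: Floyd cycle detection on r ↦ (r*10) % n. Each while loop gets fuel n.natAbs + 2,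
-- which only makes it total: the Boolean condition is proved to exit first.
def pvF (n r : Int) : Int := PySem.Int.mod (r * 10) n

-- phase 1: tortoise/hare race to a meeting point inside the cycle
def pvBPhase1 (n : Int) : Nat → Int → Int → Int
  | 0, slow, _ => slow
  | fuel + 1, slow, fast =>
    if slow != fast then pvBPhase1 n fuel (pvF n slow) (pvF n (pvF n fast)) else slow

-- phase 2: find mu, the index where the cycle starts
def pvBPhase2 (n : Int) : Nat → Int → Int → Int → Int × Int
  | 0, mu, slow, _ => (mu, slow)
  | fuel + 1, mu, slow, fast =>
    if slow != fast then pvBPhase2 n fuel (mu + 1) (pvF n slow) (pvF n fast) else (mu, slow)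

-- phase 3: find lam, the cycle length
def pvBPhase3 (n : Int) (slow : Int) : Nat → Int → Int → Int
  | 0, lam, _ => lam
  | fuel + 1, lam, fast =>
    if slow != fast then pvBPhase3 n slow fuel (lam + 1) (pvF n fast) else lam

-- phase 4: emit k digits ('for _ in range(k)'; the Python counters are ≥ 0, so range
-- iterates exactly .toNat times)
def pvBEmit (n : Int) : Nat → Int → List (List Char) → List (List Char) × Int
  | 0, r, out => (out, r)
  | k + 1, r, out =>
    pvBEmit n k (pvF n r) (out ++ [PySem.Int.toChars (PySem.Int.floordiv (r * 10) n)])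

def get_repeating_sequence_alt (n : Int) : String :=
  let fuel := n.natAbs + 2
  let fast0 := pvBPhase1 n fuel (pvF n 1) (pvF n (pvF n 1))
  let (mu, slow) := pvBPhase2 n fuel 0 1 fast0
  let lam := pvBPhase3 n slow fuel 1 (pvF n slow)
  if slow == 0 then
    String.ofList (PySem.Chars.join [] (pvBEmit n mu.toNat 1 []).1)
  else
    String.ofList (PySem.Chars.slice (PySem.Chars.join [] (pvBEmit n (mu + lam).toNat 1 []).1)
      (some mu) none)

-- ===== PRECONDITION & SPEC =====
-- n = 0 makes both Pythons raise ZeroDivisionError; that is all Pre_ excludes.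
def Pre_get_repeating_sequence (n : Int) : Prop := n ≠ 0
instance (n : Int) : Decidable (Pre_get_repeating_sequence n) := by
  unfold Pre_get_repeating_sequence; infer_instance

def pvWitness_get_repeating_sequence : Int := (7)

def Spec_get_repeating_sequence (n : Int) (out : String) : Prop := out = get_repeating_sequence_alt n
instance (n : Int) (out : String) : Decidable (Spec_get_repeating_sequence n out) := by
  unfold Spec_get_repeating_sequence; infer_instance

-- ===== CLAIM (what is proved, stated in full; the proofs are below) =====
def Claim_equal_get_repeating_sequence : Prop := ∀ (n : Int), Dom_get_repeating_sequence n → Pre_get_repeating_sequence n → Spec_get_repeating_sequence n (get_repeating_sequence n)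

-- ===== LEMMAS AND PROOFS =====

-- The remainder orbit: pvX n i = the remainder after i steps (x 0 = 1).
def pvX (n : Int) (i : Nat) : Int := (pvF n)^[i] 1

-- A's digit strings for indices 0..k-1, and A's seen-dict after k steps.
def pvDigits (n : Int) (k : Nat) : List (List Char) :=
  (List.range k).map (fun i => PySem.Int.toChars (PySem.Int.floordiv (pvX n i * 10) n))

def pvDictA (n : Int) (k : Nat) : PySem.Dict Int Int :=
  PySem.Dict.mk ((List.range k).map (fun i => (pvX n i, (i : Int))))

theorem pvX_zero (n : Int) : pvX n 0 = 1 := rfl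

theorem pvX_succ (n : Int) (i : Nat) : pvX n (i + 1) = pvF n (pvX n i) :=
  Function.iterate_succ_apply' (pvF n) i 1

theorem pvX_add (n : Int) (i k : Nat) : pvX n (i + k) = (pvF n)^[k] (pvX n i) := by
  simpa [pvX, Nat.add_comm] using (Function.iterate_add_apply (pvF n) k i 1)

theorem pv_prop (n : Int) {i j : Nat} (h : pvX n i = pvX n j) (k : Nat) :
    pvX n (i + k) = pvX n (j + k) := by rw [pvX_add, pvX_add, h]

theorem pv_prop_mul (n : Int) {m p : Nat} (h : pvX n (m + p) = pvX n m) (k : Nat) :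
    pvX n (m + k * p) = pvX n m := by
  induction k with
  | zero => simp
  | succ k ih =>
    have h2 := pv_prop n h (k * p)
    have e : m + (k + 1) * p = m + p + k * p := by ring
    rw [e, h2, ih]

theorem pv_join_nil : ∀ (l : List (List Char)), PySem.Chars.join [] l = l.flatten
  | [] => rfl
  | [_] => by simp [PySem.Chars.join, List.intercalate]
  | a :: b :: t => by
    have ih := pv_join_nil (b :: t)
    simp only [PySem.Chars.join, List.intercalate] at ih ⊢
    simp [List.intersperse, List.flatten_cons, ih]

theorem pv_f_zero (n : Int) : pvF n 0 = 0 := by simp [pvF, pysem]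

theorem pv_zero_persists (n : Int) {t : Nat} (h : pvX n t = 0) (k : Nat) :
    pvX n (t + k) = 0 := by
  induction k with
  | zero => simpa using h
  | succ k ih => rw [← Nat.add_assoc, pvX_succ, ih, pv_f_zero]

-- ## The cycle-structure lemmas.  Throughout, mu and lam are characterised by:
--   hlam0 : 0 < lam,  hcyc : x (mu+lam) = x mu,
--   hlam_min : lam is the least positive p with x (m+p) = x m for some m,
--   hmu_min  : mu is the least m with x (m+lam) = x m.

theorem pv_evper (n : Int) {mu lam : Nat} (hcyc : pvX n (mu + lam) = pvX n mu)
    {t : Nat} (ht : mu ≤ t) : pvX n (t + lam) = pvX n t := by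
  obtain ⟨k, rfl⟩ := Nat.exists_eq_add_of_le ht
  have := pv_prop n hcyc k
  have e1 : mu + lam + k = mu + k + lam := by ring
  rw [e1] at this
  exact this

theorem pv_evper_mul (n : Int) {mu lam : Nat} (hcyc : pvX n (mu + lam) = pvX n mu)
    {t : Nat} (ht : mu ≤ t) (k : Nat) : pvX n (t + k * lam) = pvX n t :=
  pv_prop_mul n (pv_evper n hcyc ht) k

-- the 'shrink' trick: any repeat x (i+p) = x i with p ≥ 1 forces x (i+lam) = x i,
-- hence (minimality of mu) i ≥ mu.
theorem pv_L1 (n : Int) {mu lam : Nat} (hcyc : pvX n (mu + lam) = pvX n mu)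
    (hmu_min : ∀ m, pvX n (m + lam) = pvX n m → mu ≤ m)
    {i p : Nat} (hp : 0 < p) (h : pvX n (i + p) = pvX n i) : mu ≤ i := by
  apply hmu_min
  have hT : pvX n (i + mu * p) = pvX n i := pv_prop_mul n h mu
  have hTmu : mu ≤ i + mu * p := by
    rcases Nat.eq_zero_or_pos mu with h0 | h0
    · omega
    · have : mu ≤ mu * p := Nat.le_mul_of_pos_right mu hp
      omega
  have h1 : pvX n (i + lam) = (pvF n)^[lam] (pvX n i) := pvX_add n i lam
  have h2 : pvX n (i + mu * p + lam) = (pvF n)^[lam] (pvX n (i + mu * p)) :=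
    pvX_add n (i + mu * p) lam
  rw [h1, ← hT, ← h2, pv_evper n hcyc hTmu, hT]

theorem pv_L2 (n : Int) {mu lam : Nat} (hlam0 : 0 < lam)
    (hcyc : pvX n (mu + lam) = pvX n mu)
    (hlam_min : ∀ p m, 0 < p → pvX n (m + p) = pvX n m → lam ≤ p)
    {t q : Nat} (ht : mu ≤ t) (h : pvX n (t + q) = pvX n t) : lam ∣ q := by
  have hb := Nat.mod_lt q hlam0
  have hdm := Nat.div_add_mod q lam
  by_cases hb0 : q % lam = 0
  · exact Nat.dvd_of_mod_eq_zero hb0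
  · exfalso
    have hmul : lam * (q / lam) = (q / lam) * lam := Nat.mul_comm _ _
    have e : t + q = (t + q % lam) + (q / lam) * lam := by omega
    have h3 : pvX n ((t + q % lam) + (q / lam) * lam) = pvX n (t + q % lam) :=
      pv_evper_mul n hcyc (by omega) (q / lam)
    have h4 : pvX n (t + q % lam) = pvX n t := by rw [← h3, ← e, h]
    have := hlam_min (q % lam) t (by omega) h4
    omega

theorem pv_inj (n : Int) {mu lam : Nat} (hcyc : pvX n (mu + lam) = pvX n mu)
    (hlam_min : ∀ p m, 0 < p → pvX n (m + p) = pvX n m → lam ≤ p)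
    (hmu_min : ∀ m, pvX n (m + lam) = pvX n m → mu ≤ m)
    {i j : Nat} (hij : i < j) (hj : j < mu + lam) (h : pvX n i = pvX n j) : False := by
  have hp : 0 < j - i := by omega
  have h1 : pvX n (i + (j - i)) = pvX n i := by
    rw [Nat.add_sub_cancel' (Nat.le_of_lt hij)]; exact h.symm
  have hlp := hlam_min (j - i) i hp h1
  have hmi := pv_L1 n hcyc hmu_min hp h1
  omega

-- a zero remainder can only occur from index mu on
theorem pv_zero_ge (n : Int) {mu lam : Nat} (hcyc : pvX n (mu + lam) = pvX n mu)
    (hmu_min : ∀ m, pvX n (m + lam) = pvX n m → mu ≤ m)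
    {t : Nat} (h : pvX n t = 0) : mu ≤ t := by
  apply pv_L1 n hcyc hmu_min (p := 1) (by omega)
  rw [pvX_succ, h, pv_f_zero]

-- if 0 ever occurs in the orbit it occurs at mu (and the cycle is {0})
theorem pv_zero_at_mu (n : Int) {mu lam : Nat} (hlam0 : 0 < lam)
    (hcyc : pvX n (mu + lam) = pvX n mu)
    (hmu_min : ∀ m, pvX n (m + lam) = pvX n m → mu ≤ m)
    {t : Nat} (h : pvX n t = 0) : pvX n mu = 0 := by
  have hmt : mu ≤ t := pv_zero_ge n hcyc hmu_min h
  have h1 : pvX n (mu + t * lam) = pvX n mu :=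
    pv_evper_mul n hcyc (Nat.le_refl mu) t
  have hge : t ≤ mu + t * lam := by
    have : t ≤ t * lam := Nat.le_mul_of_pos_right t hlam0
    omega
  have h2 : pvX n (mu + t * lam) = 0 := by
    have := pv_zero_persists n h (mu + t * lam - t)
    rwa [Nat.add_sub_cancel' hge] at this
  rw [← h1, h2]

theorem pv_f_mem_pos {n : Int} (h : 0 < n) (a : Int) : pvF n a ∈ Finset.Ico 0 n := by
  simp only [pvF, Finset.mem_Ico]
  exact ⟨PySem.Int.mod_nonneg _ h, PySem.Int.mod_lt _ h⟩

theorem pv_f_mem_neg {n : Int} (h : n < 0) (a : Int) : pvF n a ∈ Finset.Ico (n + 1) 1 := by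
  have := PySem.Int.mod_neg_bounds (a * 10) h
  simp only [pvF, Finset.mem_Ico]
  omega

-- pigeonhole: the orbit repeats within the first n.natAbs + 1 steps
theorem pv_exists_rep {n : Int} (hn : n ≠ 0) :
    ∃ i j, i < j ∧ j ≤ n.natAbs + 1 ∧ pvX n i = pvX n j := by
  have hmaps : Set.MapsTo (pvX n) ↑(Finset.Icc 1 (n.natAbs + 1))
      ↑(if 0 < n then Finset.Ico 0 n else Finset.Ico (n + 1) 1) := by
    intro i hi
    simp only [Finset.coe_Icc, Set.mem_Icc] at hi
    obtain ⟨k, rfl⟩ : ∃ k, i = k + 1 := ⟨i - 1, by omega⟩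
    rw [pvX_succ]
    by_cases hpos : 0 < n
    · simp only [hpos, if_true, Finset.mem_coe]
      exact pv_f_mem_pos hpos _
    · simp only [hpos, if_false, Finset.mem_coe]
      exact pv_f_mem_neg (by omega) _
  have hcard : (if 0 < n then Finset.Ico 0 n else Finset.Ico (n + 1) 1).card
      < (Finset.Icc 1 (n.natAbs + 1)).card := by
    rw [Nat.card_Icc]
    by_cases hpos : 0 < n
    · simp only [hpos, if_true, Int.card_Ico]
      omega
    · simp only [hpos, if_false, Int.card_Ico]
      omega
  obtain ⟨a, ha, b, hb, hab, hfab⟩ :=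
    Finset.exists_ne_map_eq_of_card_lt_of_maps_to hcard hmaps
  simp only [Finset.mem_Icc] at ha hb
  rcases Nat.lt_or_ge a b with hlt | hge
  · exact ⟨a, b, hlt, by omega, hfab⟩
  · exact ⟨b, a, by omega, by omega, hfab.symm⟩

-- the orbit is injective below mu + lam, so mu + lam ≤ n.natAbs + 1
theorem pv_bound {n : Int} (hn : n ≠ 0) {mu lam : Nat}
    (hcyc : pvX n (mu + lam) = pvX n mu)
    (hlam_min : ∀ p m, 0 < p → pvX n (m + p) = pvX n m → lam ≤ p)
    (hmu_min : ∀ m, pvX n (m + lam) = pvX n m → mu ≤ m) :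
    mu + lam ≤ n.natAbs + 1 := by
  by_contra hlt
  obtain ⟨i, j, hij, hjb, hx⟩ := pv_exists_rep hn
  exact pv_inj n hcyc hlam_min hmu_min hij (by omega) hx

-- ## loop characterisations

-- phase 1 finds x v for the least v ≥ 1 with x v = x (2v)
theorem pv_phase1_spec (n : Int) {v : Nat} (hmeet : pvX n v = pvX n (2 * v))
    (hleast : ∀ k, 0 < k → k < v → pvX n k ≠ pvX n (2 * k)) :
    ∀ fuel k, 0 < k → k ≤ v → v ≤ k + fuel →
      pvBPhase1 n fuel (pvX n k) (pvX n (2 * k)) = pvX n v := by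
  intro fuel
  induction fuel with
  | zero =>
    intro k hk0 hkv hvk
    have : k = v := by omega
    subst this
    simp [pvBPhase1]
  | succ fuel ih =>
    intro k hk0 hkv hvk
    rcases Nat.lt_or_ge k v with hlt | hge
    · have hne : pvX n k ≠ pvX n (2 * k) := hleast k hk0 hlt
      have e1 : pvF n (pvX n k) = pvX n (k + 1) := (pvX_succ n k).symm
      have e2 : pvF n (pvF n (pvX n (2 * k))) = pvX n (2 * (k + 1)) := by
        rw [← pvX_succ, ← pvX_succ]
        congr 1
      simp only [pvBPhase1, bne_iff_ne, ne_eq, hne, not_false_eq_true, if_true, e1, e2]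
      exact ih (k + 1) (by omega) (by omega) (by omega)
    · have : k = v := by omega
      subst this
      simp [pvBPhase1, hmeet]

-- phase 2 finds (mu, x mu): walking both pointers v apart, they first meet at mu
theorem pv_phase2_spec (n : Int) {mu v : Nat}
    (hmeet : pvX n (mu + v) = pvX n mu)
    (hleast : ∀ m, m < mu → pvX n m ≠ pvX n (m + v)) :
    ∀ fuel m, m ≤ mu → mu ≤ m + fuel →
      pvBPhase2 n fuel (↑m) (pvX n m) (pvX n (m + v)) = (↑mu, pvX n mu) := by
  intro fuel
  induction fuel with
  | zero =>
    intro m hm hmf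
    have : m = mu := by omega
    subst this
    simp [pvBPhase2]
  | succ fuel ih =>
    intro m hm hmf
    rcases Nat.lt_or_ge m mu with hlt | hge
    · have hne : pvX n m ≠ pvX n (m + v) := hleast m hlt
      have e1 : pvF n (pvX n m) = pvX n (m + 1) := (pvX_succ n m).symm
      have e2 : pvF n (pvX n (m + v)) = pvX n ((m + 1) + v) := by
        rw [← pvX_succ]
        congr 1
        omega
      have e3 : (↑m + 1 : Int) = ↑(m + 1) := by push_cast; ring
      simp only [pvBPhase2, bne_iff_ne, ne_eq, hne, not_false_eq_true, if_true, e1, e2, e3]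
      exact ih (m + 1) (by omega) (by omega)
    · have : m = mu := by omega
      subst this
      simp [pvBPhase2, hmeet]

-- phase 3 finds lam, the least l ≥ 1 with x (mu + l) = x mu
theorem pv_phase3_spec (n : Int) {mu lam : Nat}
    (hcyc : pvX n (mu + lam) = pvX n mu)
    (hleast : ∀ l, 0 < l → l < lam → pvX n (mu + l) ≠ pvX n mu) :
    ∀ fuel l, 0 < l → l ≤ lam → lam ≤ l + fuel →
      pvBPhase3 n (pvX n mu) fuel (↑l) (pvX n (mu + l)) = ↑lam := by
  intro fuel
  induction fuel with
  | zero =>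
    intro l hl0 hll hlf
    have : l = lam := by omega
    subst this
    simp [pvBPhase3]
  | succ fuel ih =>
    intro l hl0 hll hlf
    rcases Nat.lt_or_ge l lam with hlt | hge
    · have hne : pvX n mu ≠ pvX n (mu + l) := (hleast l hl0 hlt).symm
      have e2 : pvF n (pvX n (mu + l)) = pvX n (mu + (l + 1)) := by
        rw [← pvX_succ]
        congr 1
      have e3 : (↑l + 1 : Int) = ↑(l + 1) := by push_cast; ring
      simp only [pvBPhase3, bne_iff_ne, ne_eq, hne, not_false_eq_true, if_true, e2, e3]
      exact ih (l + 1) (by omega) (by omega) (by omega)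
    · have : l = lam := by omega
      subst this
      simp [pvBPhase3, hcyc.symm]

-- phase 4 emits the digit strings of x t, x (t+1), …, x (t+k-1)
theorem pv_emit_spec (n : Int) :
    ∀ (k t : Nat) (out : List (List Char)),
      pvBEmit n k (pvX n t) out
        = (out ++ (List.range k).map
            (fun i => PySem.Int.toChars (PySem.Int.floordiv (pvX n (t + i) * 10) n)),
           pvX n (t + k)) := by
  intro k
  induction k with
  | zero => intro t out; simp [pvBEmit]
  | succ k ih =>
    intro t out
    have e1 : pvF n (pvX n t) = pvX n (t + 1) := (pvX_succ n t).symm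
    simp only [pvBEmit, e1, ih (t + 1), List.range_succ_eq_map, List.map_cons,
      List.map_map, Prod.mk.injEq]
    refine ⟨?_, by congr 1; omega⟩
    rw [List.append_assoc]
    congr 1
    simp only [Nat.add_zero, List.cons_append, List.nil_append, List.cons.injEq]
    refine ⟨trivial, ?_⟩
    apply List.map_congr_left
    intro i _
    simp only [Function.comp]
    have e : t + 1 + i = t + Nat.succ i := by omega
    rw [e]

-- the A-side dict after t steps: contains ⟺ some earlier x s equals the key
theorem pv_containsA (n : Int) (t : Nat) (v : Int) :
    (pvDictA n t).contains v = true ↔ ∃ s, s < t ∧ pvX n s = v := by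
  rw [PySem.Dict.contains_iff_mem_keys]
  simp [pvDictA, PySem.Dict.keys_mk, List.mem_range]

-- A's loop: from state t it runs to the stopping index t0
theorem pv_aloop_spec (n : Int) {t0 : Nat}
    (hrun : ∀ t, t < t0 → (pvX n t != 0 && !((pvDictA n t).contains (pvX n t))) = true)
    (hstop : (pvX n t0 != 0 && !((pvDictA n t0).contains (pvX n t0))) = false) :
    ∀ fuel t, t ≤ t0 → t0 ≤ t + fuel →
      pvALoop n fuel ((pvDigits n t).flatten) (pvX n t) (pvDictA n t) (↑t)
        = ((pvDigits n t0).flatten, pvX n t0, pvDictA n t0) := by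
  intro fuel
  induction fuel with
  | zero =>
    intro t ht htf
    have : t = t0 := by omega
    subst this
    simp [pvALoop]
  | succ fuel ih =>
    intro t ht htf
    rcases Nat.lt_or_ge t t0 with hlt | hge
    · have hc := hrun t hlt
      have hfree : (pvDictA n t).contains (pvX n t) = false := by
        rcases Bool.and_eq_true _ _ |>.mp hc with ⟨_, h2⟩
        simpa using h2
      have hdict : (pvDictA n t).insert (pvX n t) (↑t) = pvDictA n (t + 1) := by
        apply PySem.Dict.ext
        rw [PySem.Dict.items_insert_of_not_contains _ _ hfree]
        simp [pvDictA, List.range_succ]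
      have hseq : (pvDigits n t).flatten
            ++ PySem.Int.toChars (PySem.Int.floordiv (pvX n t * 10) n)
          = (pvDigits n (t + 1)).flatten := by
        simp [pvDigits, List.range_succ]
      have hrem : PySem.Int.mod (pvX n t * 10) n = pvX n (t + 1) := by
        rw [pvX_succ]; rfl
      have e3 : (↑t + 1 : Int) = ↑(t + 1) := by push_cast; ring
      simp only [pvALoop, hc, if_true, hseq, hrem, hdict, e3]
      exact ih (t + 1) (by omega) (by omega)
    · have : t = t0 := by omega
      subst this
      simp only [pvALoop, hstop, Bool.false_eq_true, if_false]

-- lookup in the A-side dict at x s gives s (requires the keys below t to be distinct)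
theorem pv_getDA (n : Int) {t s : Nat}
    (hinj : ∀ i j, i < j → j < t → pvX n i = pvX n j → False)
    (hs : s < t) :
    (pvDictA n t).getD (pvX n s) 0 = ↑s := by
  apply PySem.Dict.getD_of_mem_items
  · show (pvX n s, (s : Int)) ∈ (List.range t).map (fun i => (pvX n i, (i : Int)))
    exact List.mem_map.mpr ⟨s, List.mem_range.mpr hs, rfl⟩
  · simp only [pvDictA, PySem.Dict.keys_mk, List.map_map]
    refine List.Nodup.map_on ?_ List.nodup_range
    intro i hi j hj hx
    simp only [List.mem_range] at hi hj
    rcases Nat.lt_trichotomy i j with h | h | h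
    · exact absurd (hinj i j h hj (by simpa using hx)) (by simp)
    · exact h
    · exact absurd (hinj j i h hi (by simpa using hx.symm)) (by simp)

-- ===== VERDICT (by name: the statement is the Claim_ definition above) =====
theorem get_repeating_sequence_spec : Claim_equal_get_repeating_sequence := by
  intro n _ hn
  have hn : n ≠ 0 := hn
  unfold Spec_get_repeating_sequence
  classical
  -- minimal period lam and minimal cycle start mu of the remainder orbit
  obtain ⟨i, j, hij, hjb, hxij⟩ := pv_exists_rep hn
  have hex : ∃ p, 0 < p ∧ ∃ m, pvX n (m + p) = pvX n m :=
    ⟨j - i, by omega, i, by rw [Nat.add_sub_cancel' (Nat.le_of_lt hij)]; exact hxij.symm⟩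
  set lam := Nat.find hex with hlamdef
  obtain ⟨hlam0, m0, hm0⟩ := Nat.find_spec hex
  have hlam0 : 0 < lam := hlam0
  have hm0 : pvX n (m0 + lam) = pvX n m0 := hm0
  have hlam_min : ∀ p m, 0 < p → pvX n (m + p) = pvX n m → lam ≤ p :=
    fun p m hp h => Nat.find_min' hex ⟨hp, m, h⟩
  have hex2 : ∃ m, pvX n (m + lam) = pvX n m := ⟨m0, hm0⟩
  set mu := Nat.find hex2 with hmudef
  have hcyc : pvX n (mu + lam) = pvX n mu := Nat.find_spec hex2
  have hmu_min : ∀ m, pvX n (m + lam) = pvX n m → mu ≤ m :=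
    fun m h => Nat.find_min' hex2 h
  have hbound : mu + lam ≤ n.natAbs + 1 := pv_bound hn hcyc hlam_min hmu_min
  have hinj : ∀ a b, a < b → b < mu + lam → pvX n a = pvX n b → False :=
    fun a b h1 h2 h3 => pv_inj n hcyc hlam_min hmu_min h1 h2 h3
  -- the least Floyd meeting index v0
  have hdm : lam * (mu / lam) + mu % lam = mu := Nat.div_add_mod mu lam
  have hml : mu % lam < lam := Nat.mod_lt mu hlam0
  have hcand : 0 < lam * (mu / lam + 1)
      ∧ pvX n (lam * (mu / lam + 1)) = pvX n (2 * (lam * (mu / lam + 1))) := by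
    refine ⟨by positivity, ?_⟩
    have hv : mu ≤ lam * (mu / lam + 1) := by
      have e : lam * (mu / lam + 1) = lam * (mu / lam) + lam := by ring
      omega
    have h1 : pvX n (lam * (mu / lam + 1) + (mu / lam + 1) * lam)
        = pvX n (lam * (mu / lam + 1)) := pv_evper_mul n hcyc hv (mu / lam + 1)
    have e2 : 2 * (lam * (mu / lam + 1)) = lam * (mu / lam + 1) + (mu / lam + 1) * lam := by
      ring
    rw [e2, h1]
  have hex3 : ∃ v, 0 < v ∧ pvX n v = pvX n (2 * v) := ⟨lam * (mu / lam + 1), hcand⟩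
  set v0 := Nat.find hex3 with hv0def
  obtain ⟨hv0, hmeet⟩ := Nat.find_spec hex3
  have hv0 : 0 < v0 := hv0
  have hmeet : pvX n v0 = pvX n (2 * v0) := hmeet
  have hv_least : ∀ k, 0 < k → k < v0 → pvX n k ≠ pvX n (2 * k) :=
    fun k hk hkv h => absurd (Nat.find_min' hex3 ⟨hk, h⟩) (by omega)
  have hv0b : v0 ≤ mu + lam := by
    have h1 : v0 ≤ lam * (mu / lam + 1) := Nat.find_min' hex3 hcand
    have e : lam * (mu / lam + 1) = lam * (mu / lam) + lam := by ring
    omega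
  have hvv : pvX n (v0 + v0) = pvX n v0 := by
    have e : v0 + v0 = 2 * v0 := by omega
    rw [e]; exact hmeet.symm
  have hmuv : mu ≤ v0 := pv_L1 n hcyc hmu_min hv0 hvv
  have hdvd : lam ∣ v0 := pv_L2 n hlam0 hcyc hlam_min hmuv hvv
  have hmeet2 : pvX n (mu + v0) = pvX n mu := by
    obtain ⟨c, hc⟩ := hdvd
    have e : mu + v0 = mu + c * lam := by rw [hc]; ring
    rw [e]
    exact pv_evper_mul n hcyc (Nat.le_refl mu) c
  have hleast2 : ∀ m, m < mu → pvX n m ≠ pvX n (m + v0) := by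
    intro m hm h
    exact absurd (pv_L1 n hcyc hmu_min hv0 h.symm) (by omega)
  have hleast3 : ∀ l, 0 < l → l < lam → pvX n (mu + l) ≠ pvX n mu := by
    intro l h0 hl h
    exact absurd (hlam_min l mu h0 h) (by omega)
  -- evaluate B's four phases
  have hp1 : pvBPhase1 n (n.natAbs + 2) (pvF n 1) (pvF n (pvF n 1)) = pvX n v0 :=
    pv_phase1_spec n hmeet hv_least (n.natAbs + 2) 1 (by omega) (by omega) (by omega)
  have hp2 : pvBPhase2 n (n.natAbs + 2) 0 1 (pvX n v0) = (↑mu, pvX n mu) := by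
    have h := pv_phase2_spec n hmeet2 hleast2 (n.natAbs + 2) 0 (by omega) (by omega)
    simpa [pvX_zero] using h
  have hp3' : pvBPhase3 n (pvX n mu) (n.natAbs + 2) 1 (pvX n (mu + 1)) = ↑lam :=
    pv_phase3_spec n hcyc hleast3 (n.natAbs + 2) 1 (by omega) (by omega) (by omega)
  have hp3 : pvBPhase3 n (pvX n mu) (n.natAbs + 2) 1 (pvF n (pvX n mu)) = ↑lam := by
    rw [← pvX_succ]; exact hp3'
  have hemit : ∀ k : Nat, pvBEmit n k 1 [] = (pvDigits n k, pvX n k) := by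
    intro k
    have h := pv_emit_spec n k 0 []
    simpa [pvDigits] using h
  unfold get_repeating_sequence_alt
  simp only [hp1, hp2, hp3]
  -- evaluate A's loop at the stopping index
  by_cases hz : pvX n mu = 0
  · -- the expansion terminates: A stops at mu with remainder 0 not among the keys
    have hrun : ∀ t, t < mu →
        (pvX n t != 0 && !((pvDictA n t).contains (pvX n t))) = true := by
      intro t ht
      have h1 : pvX n t ≠ 0 := fun h0 =>
        absurd (pv_zero_ge n hcyc hmu_min h0) (by omega)
      have h2 : (pvDictA n t).contains (pvX n t) = false := by
        rw [← Bool.not_eq_true, pv_containsA]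
        rintro ⟨s, hs, hx⟩
        exact hinj s t hs (by omega) hx
      simp [h1, h2]
    have hstop : (pvX n mu != 0 && !((pvDictA n mu).contains (pvX n mu))) = false := by
      simp [hz]
    have hA := pv_aloop_spec n hrun hstop (n.natAbs + 2) 0 (by omega) (by omega)
    have hA' : pvALoop n (n.natAbs + 2) [] 1 PySem.Dict.empty 0
        = ((pvDigits n mu).flatten, pvX n mu, pvDictA n mu) := hA
    unfold get_repeating_sequence
    simp only [hA']
    have hcf : (pvDictA n mu).contains (pvX n mu) = false := by
      rw [← Bool.not_eq_true, pv_containsA]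
      rintro ⟨s, hs, hx⟩
      rw [hz] at hx
      exact absurd (pv_zero_ge n hcyc hmu_min hx) (by omega)
    simp only [hcf, Bool.false_eq_true, if_false]
    have hzb : (pvX n mu == 0) = true := by simp [hz]
    simp only [hzb, if_true]
    rw [Int.toNat_natCast, hemit mu, pv_join_nil]
  · -- the expansion repeats: A stops at mu + lam, the repeated remainder was seen at mu
    have hnz : ∀ t, t < mu + lam → pvX n t ≠ 0 := by
      intro t _ h0
      exact hz (pv_zero_at_mu n hlam0 hcyc hmu_min h0)
    have hrun : ∀ t, t < mu + lam →
        (pvX n t != 0 && !((pvDictA n t).contains (pvX n t))) = true := by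
      intro t ht
      have h2 : (pvDictA n t).contains (pvX n t) = false := by
        rw [← Bool.not_eq_true, pv_containsA]
        rintro ⟨s, hs, hx⟩
        exact hinj s t hs (by omega) hx
      simp [hnz t ht, h2]
    have hstop : (pvX n (mu + lam) != 0
        && !((pvDictA n (mu + lam)).contains (pvX n (mu + lam)))) = false := by
      have hct : (pvDictA n (mu + lam)).contains (pvX n (mu + lam)) = true := by
        rw [pv_containsA]
        exact ⟨mu, by omega, hcyc.symm⟩
      simp [hct]
    have hA := pv_aloop_spec n hrun hstop (n.natAbs + 2) 0 (by omega) (by omega)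
    have hA' : pvALoop n (n.natAbs + 2) [] 1 PySem.Dict.empty 0
        = ((pvDigits n (mu + lam)).flatten, pvX n (mu + lam), pvDictA n (mu + lam)) := hA
    unfold get_repeating_sequence
    simp only [hA']
    have hct : (pvDictA n (mu + lam)).contains (pvX n (mu + lam)) = true := by
      rw [pv_containsA]
      exact ⟨mu, by omega, hcyc.symm⟩
    simp only [hct, if_true]
    have hget : (pvDictA n (mu + lam)).getD (pvX n (mu + lam)) 0 = ↑mu := by
      rw [hcyc]
      exact pv_getDA n hinj (by omega)
    rw [hget]
    have hzb : (pvX n mu == 0) = false := by simp [hz]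
    simp only [hzb, Bool.false_eq_true, if_false]
    have htn : ((↑mu : Int) + ↑lam).toNat = mu + lam := by
      rw [← Nat.cast_add, Int.toNat_natCast]
    rw [htn, hemit (mu + lam), pv_join_nil]
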